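-- pv_equiv track=rewrite | github.com/Arkya29/DiscordFavoritesEmotesSaver | discordFavoritesEmotesSaver.py | moddedFavorites
-- ===== SOURCE A (Python) =====
-- def moddedFavorites(value): # return string with favorites modded emotes (added on discord by somebody)
--     value = value.replace('>', '","') # replacing '>' by '","'
--     # Characters (with lower case and upper case) who can be in the name of an emote (numbers aren't supported) :
--     a = "abcdefghijklmnopqrstuvwxyz <:_"
--     a = a + a.upper()
--     # Deleting the name of the emote :
--     for letter in a:
--         value = value.replace(letter,"")
--     value = value[:-2] # deleting the two charaters '",' at the end
--     return value
-- ===== SOURCE B (Python) =====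
-- def moddedFavorites(value):
--     delete = set("abcdefghijklmnopqrstuvwxyzABCDEFGHIJKLMNOPQRSTUVWXYZ <:_")
--     out = "".join('","' if c == '>' else ('' if c in delete else c) for c in value)
--     return out[:-2]
-- ===== Notes on version B (the rewrite author's own statement) =====
-- stated objective: idiomatic
-- what changed: Replaces A's closing-bracket replace followed by ~60 sequential whole-string str.replace deletion passes with one character-level pass: a join over the input that maps the closing bracket to the quote-comma-quote separator, drops characters belonging to a delete set built once, keeps the rest, and finally trims the last two characters.
import Mathlib
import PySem

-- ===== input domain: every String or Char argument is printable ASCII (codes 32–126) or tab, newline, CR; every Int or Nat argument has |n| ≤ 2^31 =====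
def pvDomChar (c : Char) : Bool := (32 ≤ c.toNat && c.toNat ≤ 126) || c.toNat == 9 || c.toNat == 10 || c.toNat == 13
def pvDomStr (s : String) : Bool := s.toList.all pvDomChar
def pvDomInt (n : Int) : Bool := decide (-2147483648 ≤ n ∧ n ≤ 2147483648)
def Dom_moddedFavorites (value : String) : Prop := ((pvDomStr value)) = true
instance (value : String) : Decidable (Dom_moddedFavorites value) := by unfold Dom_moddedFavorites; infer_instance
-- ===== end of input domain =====

-- B replaces A's ~60 whole-string replace() scans by one character-level pass (idiomatic join over the characters); same result.

-- ===== PORT A =====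
def moddedFavorites (value : String) : String :=
  let value1 := PySem.Str.replace value ">" "\",\""
  -- a = "abcdefghijklmnopqrstuvwxyz <:_"; a = a + a.upper()
  let a : List Char :=
    "abcdefghijklmnopqrstuvwxyz <:_".toList
      ++ (PySem.Str.upper "abcdefghijklmnopqrstuvwxyz <:_").toList
  -- for letter in a: value = value.replace(letter, "")
  let value2 := a.foldl (fun v letter => PySem.Str.replace v (String.ofList [letter]) "") value1
  PySem.Str.slice value2 none (some (-2))   -- value[:-2]

-- ===== PORT B =====
-- delete = set("abcdefghijklmnopqrstuvwxyzABCDEFGHIJKLMNOPQRSTUVWXYZ <:_")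
def pvDelete : PySem.Set Char :=
  PySem.Set.ofList "abcdefghijklmnopqrstuvwxyzABCDEFGHIJKLMNOPQRSTUVWXYZ <:_".toList

def moddedFavorites_alt (value : String) : String :=
  -- out = "".join('","' if c == '>' else ('' if c in delete else c) for c in value)
  let out := String.ofList (value.toList.flatMap fun c =>
    if c == '>' then "\",\"".toList
    else if PySem.Set.contains pvDelete c then [] else [c])
  PySem.Str.slice out none (some (-2))      -- out[:-2]

-- ===== PRECONDITION & SPEC =====
def Spec_moddedFavorites (value : String) (out : String) : Prop := out = moddedFavorites_alt value
instance (value : String) (out : String) : Decidable (Spec_moddedFavorites value out) := by unfold Spec_moddedFavorites; infer_instance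

-- ===== CLAIM (what is proved, stated in full; the proofs are below) =====
def Claim_equal_moddedFavorites : Prop := ∀ (value : String), Dom_moddedFavorites value → Spec_moddedFavorites value (moddedFavorites value)

-- ===== LEMMAS AND PROOFS =====

-- Python str.replace with a single-character pattern is a flatMap over the characters.
theorem replace_go_single (c : Char) (r : List Char) :
    ∀ (fuel : Nat) (l acc : List Char), l.length ≤ fuel →
      PySem.Chars.replace.go [c] r fuel l acc
        = acc.reverse ++ l.flatMap (fun x => if x == c then r else [x]) := by
  intro fuel
  induction fuel with
  | zero =>
    intro l acc h
    have : l = [] := List.eq_nil_of_length_eq_zero (Nat.le_zero.mp h)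
    subst this; simp [PySem.Chars.replace.go]
  | succ n ih =>
    intro l acc h
    cases l with
    | nil => simp [PySem.Chars.replace.go]
    | cons x t =>
      simp only [PySem.Chars.replace.go, List.isPrefixOf, Bool.and_true,
        List.length_cons, List.length_nil, List.drop_succ_cons, List.drop_zero]
      have ht : t.length ≤ n := by simpa using Nat.le_of_succ_le_succ h
      cases hx : c == x
      · rw [if_neg (by simp), ih t (x :: acc) ht]
        have hxc : ¬ x = c := by intro e; subst e; simp at hx
        simp [List.flatMap_cons, hxc]
      · rw [if_pos (by simp), ih t (r.reverse ++ acc) ht]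
        have hxc : x = c := (beq_iff_eq.mp hx).symm
        simp [List.flatMap_cons, hxc]

theorem replace_single (c : Char) (r s : List Char) :
    PySem.Chars.replace s [c] r = s.flatMap (fun x => if x == c then r else [x]) := by
  rw [PySem.Chars.replace]
  simp only [List.isEmpty_cons, Bool.false_eq_true, if_false]
  simpa using replace_go_single c r s.length s [] (Nat.le_refl _)

theorem replace_single_empty (c : Char) (s : List Char) :
    PySem.Chars.replace s [c] [] = s.filter (fun x => !(x == c)) := by
  rw [replace_single]
  induction s with
  | nil => rfl
  | cons x t ih =>
    by_cases hx : x = c <;> simpa [hx] using ih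

-- Iterating single-character deletions over a list of characters is one filter.
theorem foldl_replace_empty (a : List Char) :
    ∀ (s : List Char),
      a.foldl (fun v c => PySem.Chars.replace v [c] []) s
        = s.filter (fun x => !(a.contains x)) := by
  induction a with
  | nil => intro s; simp
  | cons c t ih =>
    intro s
    rw [List.foldl_cons, ih, replace_single_empty, List.filter_filter]
    apply List.filter_congr
    intro x _
    by_cases hxc : x = c <;> simp [hxc, Bool.and_comm]

-- the same fold lifted through the String wrapper of port A
theorem foldl_str_replace (a : List Char) :
    ∀ (v : String),
      (a.foldl (fun v letter => PySem.Str.replace v (String.ofList [letter]) "") v).toList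
        = a.foldl (fun cs c => PySem.Chars.replace cs [c] []) v.toList := by
  induction a with
  | nil => intro v; rfl
  | cons c t ih =>
    intro v
    rw [List.foldl_cons, List.foldl_cons, ih]
    simp [PySem.Str.toList_replace]

-- A's (duplicated) delete string and B's delete set test the same characters.
theorem contains_agree (x : Char) :
    (("abcdefghijklmnopqrstuvwxyz <:_".toList
        ++ (PySem.Str.upper "abcdefghijklmnopqrstuvwxyz <:_").toList).contains x)
      = PySem.Set.contains pvDelete x := by
  have hup : (PySem.Str.upper "abcdefghijklmnopqrstuvwxyz <:_").toList
      = "ABCDEFGHIJKLMNOPQRSTUVWXYZ <:_".toList := by decide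
  have hset : pvDelete
      = "abcdefghijklmnopqrstuvwxyzABCDEFGHIJKLMNOPQRSTUVWXYZ <:_".toList := by
    set_option maxRecDepth 8192 in decide
  rw [hup, hset]
  have h1 : "abcdefghijklmnopqrstuvwxyz <:_".toList
      = "abcdefghijklmnopqrstuvwxyz".toList ++ " <:_".toList := by decide
  have h2 : "ABCDEFGHIJKLMNOPQRSTUVWXYZ <:_".toList
      = "ABCDEFGHIJKLMNOPQRSTUVWXYZ".toList ++ " <:_".toList := by decide
  have h3 : "abcdefghijklmnopqrstuvwxyzABCDEFGHIJKLMNOPQRSTUVWXYZ <:_".toList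
      = "abcdefghijklmnopqrstuvwxyz".toList
          ++ ("ABCDEFGHIJKLMNOPQRSTUVWXYZ".toList ++ " <:_".toList) := by decide
  rw [PySem.Set.contains, h1, h2, h3]
  simp only [List.contains_append]
  cases hL : "abcdefghijklmnopqrstuvwxyz".toList.contains x <;>
    cases hU : "ABCDEFGHIJKLMNOPQRSTUVWXYZ".toList.contains x <;>
      cases hS : " <:_".toList.contains x <;> rfl

-- ===== VERDICT (by name: the statement is the Claim_ definition above) =====
theorem moddedFavorites_spec : Claim_equal_moddedFavorites := by
  intro value _
  unfold Spec_moddedFavorites moddedFavorites moddedFavorites_alt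
  apply congrArg (fun s => PySem.Str.slice s none (some (-2)))
  apply String.toList_inj.mp
  rw [foldl_str_replace]
  have h1 : (PySem.Str.replace value ">" "\",\"").toList
      = value.toList.flatMap (fun x => if x == '>' then "\",\"".toList else [x]) := by
    rw [PySem.Str.toList_replace]
    exact replace_single '>' "\",\"".toList value.toList
  rw [h1, foldl_replace_empty, List.filter_flatMap]
  simp only [String.toList_ofList]
  apply List.flatMap_congr  -- pointwise
  intro c _
  by_cases hc : c == '>'
  · simp only [hc, if_pos]; decide
  · simp only [hc, Bool.false_eq_true, if_neg, not_false_iff]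
    rw [← contains_agree c, List.filter_singleton]
    cases hd : (("abcdefghijklmnopqrstuvwxyz <:_".toList
        ++ (PySem.Str.upper "abcdefghijklmnopqrstuvwxyz <:_").toList).contains c) <;> simp
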